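-- pv_equiv track=rewrite | github.com/miliar/Code_Jam_Webscraper | solutions_python/Problem_201/1993.py | check
-- ===== SOURCE A (Python) =====
-- import heapq
--
-- def check(N,K):
--   h = []
--   heapq.heappush(h,-N)
--   for i in range(K-1):
--     a = heapq.heappop(h)
--     if a >= -1:
--       return [0, 0]
--     a1 = (a+1)//2
--     a2 = a+1-a1
--     heapq.heappush(h,a1)
--     heapq.heappush(h,a2)
--   a = heapq.heappop(h)
--   if a >= -1:
--     return [0, 0]
--   a1 = (a+1)//2
--   a2 = a+1-a1
--   return [-a1,-a2]
-- ===== SOURCE B (Python) =====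
-- def check(N, K):
--     # O(log N): piles of each generation come in at most two adjacent sizes,
--     # so track (size s, count of s, count of s-1) instead of a heap.
--     s, c1, c2 = N, 1, 0
--     k = K if K > 1 else 1
--     while s > 1 and k > c1 + c2:
--         k -= c1 + c2
--         if (s - 1) % 2 == 0:
--             s, c1, c2 = (s - 1) // 2, 2 * c1 + c2, c2
--         else:
--             s, c1, c2 = s // 2, c1, c1 + 2 * c2
--     if s <= 1:
--         return [0, 0]
--     p = s if k <= c1 else s - 1
--     if p <= 1:
--         return [0, 0]
--     h = (p - 1) // 2
--     return [p - 1 - h, h]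
-- ===== Notes on version B (the rewrite author's own statement) =====
-- stated objective: faster
-- what changed: Replaces the heap that pops one pile at a time (K pops) with a counter over generations: every generation of piles has at most two adjacent sizes, so B tracks (size, count, count-1) and processes whole generations in bulk.
import Mathlib
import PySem

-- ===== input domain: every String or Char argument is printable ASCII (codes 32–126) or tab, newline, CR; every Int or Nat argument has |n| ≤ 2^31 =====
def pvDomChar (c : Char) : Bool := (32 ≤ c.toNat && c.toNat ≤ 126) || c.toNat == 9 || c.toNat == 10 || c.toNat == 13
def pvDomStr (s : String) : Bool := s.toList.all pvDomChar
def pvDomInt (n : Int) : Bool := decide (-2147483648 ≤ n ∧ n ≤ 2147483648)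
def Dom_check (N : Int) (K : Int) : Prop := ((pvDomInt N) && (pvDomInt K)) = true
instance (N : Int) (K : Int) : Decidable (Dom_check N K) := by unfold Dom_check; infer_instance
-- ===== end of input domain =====

-- B replaces A's pile-by-pile heap simulation (O(K) pops) by bulk-processing each
-- generation of piles, which has at most two adjacent sizes, in O(log N) counter steps.

-- ===== PORT A =====
-- heapq is modelled by its observable behaviour: a sorted multiset of ints, kept as a
-- run-length-encoded ascending list (value, multiplicity). heappush inserts one value,
-- heappop removes the least. This is exact for the sequence of popped values, which is
-- all A's code observes of the heap.
def pvHeapPush (x : Int) : List (Int × Nat) → List (Int × Nat)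
  | [] => [(x, 1)]
  | (y, c) :: t =>
    if x < y then (x, 1) :: (y, c) :: t
    else if x = y then (y, c + 1) :: t
    else (y, c) :: pvHeapPush x t

def pvHeapPop : List (Int × Nat) → Option (Int × List (Int × Nat))
  | [] => none
  | (y, c) :: t => some (y, if c ≤ 1 then t else (y, c - 1) :: t)

-- the loop 'for i in range(K-1)' (fuel > 0) followed by the final pop/split (fuel = 0)
def checkLoop : Nat → List (Int × Nat) → List Int
  | 0, h =>
    match pvHeapPop h with
    | none => [0, 0]            -- unreachable totality guard: the heap is never empty
    | some (a, _) =>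
      if a ≥ -1 then [0, 0]
      else
        let a1 := PySem.Int.floordiv (a + 1) 2
        let a2 := a + 1 - a1
        [-a1, -a2]
  | i + 1, h =>
    match pvHeapPop h with
    | none => [0, 0]            -- unreachable totality guard
    | some (a, h') =>
      if a ≥ -1 then [0, 0]
      else
        let a1 := PySem.Int.floordiv (a + 1) 2
        let a2 := a + 1 - a1
        checkLoop i (pvHeapPush a2 (pvHeapPush a1 h'))

def check (N : Int) (K : Int) : List Int := checkLoop (K - 1).toNat (pvHeapPush (-N) [])

-- ===== PORT B =====
-- s = current largest size, c1 = #piles of size s, c2 = #piles of size s-1, k = pops left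
def altLoop (s c1 c2 k : Int) : List Int :=
  if hgo : 1 < s ∧ c1 + c2 < k then
    if PySem.Int.mod (s - 1) 2 = 0 then
      altLoop (PySem.Int.floordiv (s - 1) 2) (2 * c1 + c2) c2 (k - (c1 + c2))
    else
      altLoop (PySem.Int.floordiv s 2) c1 (c1 + 2 * c2) (k - (c1 + c2))
  else
    if s ≤ 1 then [0, 0]
    else
      let p := if k ≤ c1 then s else s - 1
      if p ≤ 1 then [0, 0]
      else
        let h := PySem.Int.floordiv (p - 1) 2
        [p - 1 - h, h]
termination_by s.toNat
decreasing_by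
  · rw [PySem.Int.floordiv_eq_ediv_of_pos (by omega)]; omega
  · rw [PySem.Int.floordiv_eq_ediv_of_pos (by omega)]; omega

def check_alt (N : Int) (K : Int) : List Int :=
  altLoop N 1 0 (if K > 1 then K else 1)

-- ===== PRECONDITION & SPEC =====
def Spec_check (N : Int) (K : Int) (out : List Int) : Prop := out = check_alt N K
instance (N : Int) (K : Int) (out : List Int) : Decidable (Spec_check N K out) := by unfold Spec_check; infer_instance

-- ===== CLAIM (what is proved, stated in full; the proofs are below) =====
def Claim_equal_check : Prop := ∀ (N : Int) (K : Int), Dom_check N K → Spec_check N K (check N K)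

-- ===== LEMMAS AND PROOFS =====

-- smart constructor for a run-length block: present only when the multiplicity is nonzero
def ent (v : Int) (c : Nat) (t : List (Int × Nat)) : List (Int × Nat) :=
  if c = 0 then t else (v, c) :: t

lemma ent_zero (v : Int) (t : List (Int × Nat)) : ent v 0 t = t := by simp [ent]

lemma ent_forall {P : Int × Nat → Prop} {v : Int} {c : Nat} {t : List (Int × Nat)}
    (h1 : P (v, c)) (h2 : ∀ p ∈ t, P p) : ∀ p ∈ ent v c t, P p := by
  intro p hp
  unfold ent at hp
  split at hp
  · exact h2 p hp
  · rcases List.mem_cons.1 hp with rfl | hp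
    · exact h1
    · exact h2 p hp

lemma push_skip (x v : Int) (c : Nat) (t : List (Int × Nat)) (h : v < x) :
    pvHeapPush x (ent v c t) = ent v c (pvHeapPush x t) := by
  cases c with
  | zero => rw [ent_zero, ent_zero]
  | succ c => simp only [ent, Nat.succ_ne_zero, if_false, pvHeapPush,
      if_neg (by omega : ¬ x < v), if_neg (by omega : ¬ x = v)]

lemma push_here (x : Int) (c : Nat) (t : List (Int × Nat)) (h : ∀ p ∈ t, x < p.1) :
    pvHeapPush x (ent x c t) = ent x (c + 1) t := by
  cases c with
  | zero =>
    rw [ent_zero]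
    cases t with
    | nil => rfl
    | cons p t =>
      obtain ⟨y, cy⟩ := p
      simp only [ent, Nat.succ_ne_zero, if_false, pvHeapPush,
        if_pos (h (y, cy) (by simp) : x < y)]
  | succ c =>
    simp only [ent, Nat.succ_ne_zero, if_false, pvHeapPush, if_neg (by omega : ¬ x < x)]
    simp

lemma pop_ent (v : Int) (c : Nat) (t : List (Int × Nat)) :
    pvHeapPop (ent v (c + 1) t) = some (v, ent v c t) := by
  cases c with
  | zero => simp [ent, pvHeapPop]
  | succ c => simp [ent, pvHeapPop]

lemma head_done (fuel : Nat) (v : Int) (hv : v ≥ -1) (c : Nat) (t : List (Int × Nat)) :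
    checkLoop fuel (ent v (c + 1) t) = [0, 0] := by
  cases fuel <;> simp [checkLoop, pop_ent, hv]

lemma final_split (s : Int) (hs : 2 ≤ s) (c : Nat) (t : List (Int × Nat)) :
    checkLoop 0 (ent (-s) (c + 1) t)
      = [s - 1 - PySem.Int.floordiv (s-1) 2, PySem.Int.floordiv (s-1) 2] := by
  have h1 : PySem.Int.floordiv (-s + 1) 2 = PySem.Int.floordiv (s-1) 2 - (s-1) := by
    rw [PySem.Int.floordiv_eq_ediv_of_pos (by omega), PySem.Int.floordiv_eq_ediv_of_pos (by omega)]
    omega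
  simp only [checkLoop, pop_ent]
  rw [if_neg (by omega), h1]
  simp only [List.cons.injEq, and_true]
  constructor <;> ring

-- one pop with s = 2q+1 ≥ 3 on top: children are q and q
lemma pop1_odd (q : Int) (hq : 1 ≤ q) (a c2 j : Nat) (fuel : Nat) :
    checkLoop (fuel+1) (ent (-(2*q+1)) (a+1) (ent (-(2*q)) c2 (ent (-q) j [])))
      = checkLoop fuel (ent (-(2*q+1)) a (ent (-(2*q)) c2 (ent (-q) (j+2) []))) := by
  simp only [checkLoop, pop_ent]
  rw [if_neg (by omega)]
  have e1 : PySem.Int.floordiv (-(2*q+1) + 1) 2 = -q := by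
    rw [PySem.Int.floordiv_eq_ediv_of_pos (by omega)]; omega
  rw [e1, show -(2*q+1) + 1 - -q = -q by ring]
  have p1 : ∀ j' : Nat, pvHeapPush (-q) (ent (-(2*q+1)) a (ent (-(2*q)) c2 (ent (-q) j' [])))
      = ent (-(2*q+1)) a (ent (-(2*q)) c2 (ent (-q) (j'+1) [])) := fun j' => by
    rw [push_skip _ _ _ _ (by omega), push_skip _ _ _ _ (by omega), push_here _ _ _ (by simp)]
  rw [p1 j, p1 (j+1)]

-- one pop with s-1 = 2q on top (phase 2 of an odd generation): children q, q-1
lemma pop2_odd (q : Int) (hq : 1 ≤ q) (c m j : Nat) (fuel : Nat) :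
    checkLoop (fuel+1) (ent (-(2*q)) (c+1) (ent (-q) m (ent (-(q-1)) j [])))
      = checkLoop fuel (ent (-(2*q)) c (ent (-q) (m+1) (ent (-(q-1)) (j+1) []))) := by
  simp only [checkLoop, pop_ent]
  rw [if_neg (by omega)]
  have e1 : PySem.Int.floordiv (-(2*q) + 1) 2 = -q := by
    rw [PySem.Int.floordiv_eq_ediv_of_pos (by omega)]; omega
  rw [e1, show -(2*q) + 1 - -q = -(q-1) by ring]
  have p1 : pvHeapPush (-q) (ent (-(2*q)) c (ent (-q) m (ent (-(q-1)) j [])))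
      = ent (-(2*q)) c (ent (-q) (m+1) (ent (-(q-1)) j [])) := by
    rw [push_skip _ _ _ _ (by omega),
        push_here _ _ _ (ent_forall (show (-q:Int) < -(q-1) by omega) (by simp))]
  rw [p1]
  have p2 : pvHeapPush (-(q-1)) (ent (-(2*q)) c (ent (-q) (m+1) (ent (-(q-1)) j [])))
      = ent (-(2*q)) c (ent (-q) (m+1) (ent (-(q-1)) (j+1) [])) := by
    rw [push_skip _ _ _ _ (by omega), push_skip _ _ _ _ (by omega), push_here _ _ _ (by simp)]
  rw [p2]

-- one pop with s = 2q+2 ≥ 4 on top: children q+1 and q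
lemma pop1_even (q : Int) (hq : 1 ≤ q) (a c2 j1 j2 : Nat) (fuel : Nat) :
    checkLoop (fuel+1) (ent (-(2*q+2)) (a+1) (ent (-(2*q+1)) c2 (ent (-(q+1)) j1 (ent (-q) j2 []))))
      = checkLoop fuel (ent (-(2*q+2)) a (ent (-(2*q+1)) c2 (ent (-(q+1)) (j1+1) (ent (-q) (j2+1) [])))) := by
  simp only [checkLoop, pop_ent]
  rw [if_neg (by omega)]
  have e1 : PySem.Int.floordiv (-(2*q+2) + 1) 2 = -(q+1) := by
    rw [PySem.Int.floordiv_eq_ediv_of_pos (by omega)]; omega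
  rw [e1, show -(2*q+2) + 1 - -(q+1) = -q by ring]
  have p1 : pvHeapPush (-(q+1)) (ent (-(2*q+2)) a (ent (-(2*q+1)) c2 (ent (-(q+1)) j1 (ent (-q) j2 []))))
      = ent (-(2*q+2)) a (ent (-(2*q+1)) c2 (ent (-(q+1)) (j1+1) (ent (-q) j2 []))) := by
    rw [push_skip _ _ _ _ (by omega), push_skip _ _ _ _ (by omega),
        push_here _ _ _ (ent_forall (show (-(q+1):Int) < -q by omega) (by simp))]
  rw [p1]
  have p2 : pvHeapPush (-q) (ent (-(2*q+2)) a (ent (-(2*q+1)) c2 (ent (-(q+1)) (j1+1) (ent (-q) j2 []))))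
      = ent (-(2*q+2)) a (ent (-(2*q+1)) c2 (ent (-(q+1)) (j1+1) (ent (-q) (j2+1) []))) := by
    rw [push_skip _ _ _ _ (by omega), push_skip _ _ _ _ (by omega), push_skip _ _ _ _ (by omega),
        push_here _ _ _ (by simp)]
  rw [p2]

-- one pop with s-1 = 2q+1 on top (phase 2 of an even generation): children q, q
lemma pop2_even (q : Int) (hq : 1 ≤ q) (c j1 j2 : Nat) (fuel : Nat) :
    checkLoop (fuel+1) (ent (-(2*q+1)) (c+1) (ent (-(q+1)) j1 (ent (-q) j2 [])))
      = checkLoop fuel (ent (-(2*q+1)) c (ent (-(q+1)) j1 (ent (-q) (j2+2) []))) := by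
  simp only [checkLoop, pop_ent]
  rw [if_neg (by omega)]
  have e1 : PySem.Int.floordiv (-(2*q+1) + 1) 2 = -q := by
    rw [PySem.Int.floordiv_eq_ediv_of_pos (by omega)]; omega
  rw [e1, show -(2*q+1) + 1 - -q = -q by ring]
  have p1 : ∀ j2' : Nat, pvHeapPush (-q) (ent (-(2*q+1)) c (ent (-(q+1)) j1 (ent (-q) j2' [])))
      = ent (-(2*q+1)) c (ent (-(q+1)) j1 (ent (-q) (j2'+1) [])) := fun j2' => by
    rw [push_skip _ _ _ _ (by omega), push_skip _ _ _ _ (by omega), push_here _ _ _ (by simp)]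
  rw [p1 j2, p1 (j2+1)]

-- one pop with s = 2 on top: children 1 and 0
lemma pop_two (a m j : Nat) (fuel : Nat) :
    checkLoop (fuel+1) (ent (-2) (a+1) (ent (-1) m (ent 0 j [])))
      = checkLoop fuel (ent (-2) a (ent (-1) (m+1) (ent 0 (j+1) []))) := by
  simp only [checkLoop, pop_ent]
  rw [if_neg (by omega)]
  have e1 : PySem.Int.floordiv ((-2 : Int) + 1) 2 = -1 := by
    rw [PySem.Int.floordiv_eq_ediv_of_pos (by omega)]; omega
  rw [e1, show (-2 : Int) + 1 - -1 = 0 by ring]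
  have p1 : pvHeapPush (-1) (ent (-2 : Int) a (ent (-1) m (ent 0 j [])))
      = ent (-2 : Int) a (ent (-1) (m+1) (ent 0 j [])) := by
    rw [push_skip _ _ _ _ (by omega),
        push_here _ _ _ (ent_forall (show (-1:Int) < 0 by omega) (by simp))]
  rw [p1]
  have p2 : pvHeapPush 0 (ent (-2 : Int) a (ent (-1) (m+1) (ent 0 j [])))
      = ent (-2 : Int) a (ent (-1) (m+1) (ent 0 (j+1) [])) := by
    rw [push_skip _ _ _ _ (by omega), push_skip _ _ _ _ (by omega), push_here _ _ _ (by simp)]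
  rw [p2]

lemma phase1_odd (q : Int) (hq : 1 ≤ q) (c2 : Nat) :
    ∀ (i : Nat), ∀ (a j fuel : Nat),
    checkLoop (i + fuel) (ent (-(2*q+1)) (a+i) (ent (-(2*q)) c2 (ent (-q) j [])))
      = checkLoop fuel (ent (-(2*q+1)) a (ent (-(2*q)) c2 (ent (-q) (j+2*i) []))) := by
  intro i
  induction i with
  | zero => intro a j fuel; simp
  | succ i ih =>
    intro a j fuel
    rw [show a + (i+1) = (a+i)+1 from rfl, show (i+1) + fuel = (i+fuel)+1 by omega,
        pop1_odd q hq]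
    have := ih a (j+2) fuel
    rw [show j+2+2*i = j+2*(i+1) by omega] at this
    exact this

lemma phase2_odd (q : Int) (hq : 1 ≤ q) :
    ∀ (i : Nat), ∀ (c m j fuel : Nat),
    checkLoop (i + fuel) (ent (-(2*q)) (c+i) (ent (-q) m (ent (-(q-1)) j [])))
      = checkLoop fuel (ent (-(2*q)) c (ent (-q) (m+i) (ent (-(q-1)) (j+i) []))) := by
  intro i
  induction i with
  | zero => intro c m j fuel; simp
  | succ i ih =>
    intro c m j fuel
    rw [show c + (i+1) = (c+i)+1 from rfl, show (i+1) + fuel = (i+fuel)+1 by omega,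
        pop2_odd q hq]
    have := ih c (m+1) (j+1) fuel
    rw [show m+1+i = m+(i+1) by omega, show j+1+i = j+(i+1) by omega] at this
    exact this

lemma phase1_even (q : Int) (hq : 1 ≤ q) (c2 : Nat) :
    ∀ (i : Nat), ∀ (a j1 j2 fuel : Nat),
    checkLoop (i + fuel) (ent (-(2*q+2)) (a+i) (ent (-(2*q+1)) c2 (ent (-(q+1)) j1 (ent (-q) j2 []))))
      = checkLoop fuel (ent (-(2*q+2)) a (ent (-(2*q+1)) c2 (ent (-(q+1)) (j1+i) (ent (-q) (j2+i) [])))) := by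
  intro i
  induction i with
  | zero => intro a j1 j2 fuel; simp
  | succ i ih =>
    intro a j1 j2 fuel
    rw [show a + (i+1) = (a+i)+1 from rfl, show (i+1) + fuel = (i+fuel)+1 by omega,
        pop1_even q hq]
    have := ih a (j1+1) (j2+1) fuel
    rw [show j1+1+i = j1+(i+1) by omega, show j2+1+i = j2+(i+1) by omega] at this
    exact this

lemma phase2_even (q : Int) (hq : 1 ≤ q) :
    ∀ (i : Nat), ∀ (c j1 j2 fuel : Nat),
    checkLoop (i + fuel) (ent (-(2*q+1)) (c+i) (ent (-(q+1)) j1 (ent (-q) j2 [])))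
      = checkLoop fuel (ent (-(2*q+1)) c (ent (-(q+1)) j1 (ent (-q) (j2+2*i) []))) := by
  intro i
  induction i with
  | zero => intro c j1 j2 fuel; simp
  | succ i ih =>
    intro c j1 j2 fuel
    rw [show c + (i+1) = (c+i)+1 from rfl, show (i+1) + fuel = (i+fuel)+1 by omega,
        pop2_even q hq]
    have := ih c j1 (j2+2) fuel
    rw [show j2+2+2*i = j2+2*(i+1) by omega] at this
    exact this

lemma phase_two :
    ∀ (i : Nat), ∀ (a m j fuel : Nat),
    checkLoop (i + fuel) (ent (-2) (a+i) (ent (-1) m (ent 0 j [])))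
      = checkLoop fuel (ent (-2) a (ent (-1) (m+i) (ent 0 (j+i) []))) := by
  intro i
  induction i with
  | zero => intro a m j fuel; simp
  | succ i ih =>
    intro a m j fuel
    rw [show a + (i+1) = (a+i)+1 from rfl, show (i+1) + fuel = (i+fuel)+1 by omega,
        pop_two]
    have := ih a (m+1) (j+1) fuel
    rw [show m+1+i = m+(i+1) by omega, show j+1+i = j+(i+1) by omega] at this
    exact this

lemma altLoop_low (s c1 c2 k : Int) (hs : s ≤ 1) : altLoop s c1 c2 k = [0, 0] := by
  rw [altLoop, dif_neg (by omega), if_pos hs]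

lemma altLoop_end_s (s c1 c2 k : Int) (hs : 1 < s) (hstop : k ≤ c1 + c2) (hk : k ≤ c1) :
    altLoop s c1 c2 k = [s - 1 - PySem.Int.floordiv (s-1) 2, PySem.Int.floordiv (s-1) 2] := by
  rw [altLoop, dif_neg (by omega), if_neg (by omega), if_pos hk, if_neg (by omega)]

lemma altLoop_end_s1 (s c1 c2 k : Int) (hs : 1 < s - 1) (hstop : k ≤ c1 + c2) (hk : ¬ (k ≤ c1)) :
    altLoop s c1 c2 k = [s - 1 - 1 - PySem.Int.floordiv (s-1-1) 2, PySem.Int.floordiv (s-1-1) 2] := by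
  rw [altLoop, dif_neg (by omega), if_neg (by omega), if_neg hk, if_neg (by omega)]

lemma altLoop_end_one (s c1 c2 k : Int) (hs : 1 < s) (hs1 : s - 1 ≤ 1) (hstop : k ≤ c1 + c2) (hk : ¬ (k ≤ c1)) :
    altLoop s c1 c2 k = [0, 0] := by
  rw [altLoop, dif_neg (by omega), if_neg (by omega), if_neg hk, if_pos (by omega)]

lemma altLoop_go (s c1 c2 k : Int) (hs : 1 < s) (hk : c1 + c2 < k) :
    altLoop s c1 c2 k =
      if PySem.Int.mod (s - 1) 2 = 0 then
        altLoop (PySem.Int.floordiv (s - 1) 2) (2 * c1 + c2) c2 (k - (c1 + c2))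
      else
        altLoop (PySem.Int.floordiv s 2) c1 (c1 + 2 * c2) (k - (c1 + c2)) := by
  rw [altLoop, dif_pos ⟨hs, hk⟩]

lemma main_loop : ∀ fuel : Nat, ∀ s : Int, ∀ c1 c2 : Nat, 1 ≤ s → 1 ≤ c1 →
    checkLoop fuel (ent (-s) c1 (ent (-(s-1)) c2 [])) =
      altLoop s c1 c2 ((fuel : Int) + 1) := by
  intro fuel
  induction fuel using Nat.strong_induction_on with
  | _ fuel ih =>
  intro s c1 c2 hs hc1
  by_cases h1 : s = 1
  · -- a pile of size 1 on top: both sides stop at [0, 0]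
    subst h1
    obtain ⟨c1', rfl⟩ : ∃ c1', c1 = c1' + 1 := ⟨c1 - 1, by omega⟩
    rw [head_done _ _ (by omega), altLoop_low _ _ _ _ (by omega)]
  by_cases h2 : s = 2
  · subst h2
    rw [show ((2:Int) - 1) = 1 by norm_num]
    by_cases hk1 : fuel < c1
    · -- the K-th pop is still a pile of size 2
      obtain ⟨a, rfl⟩ : ∃ a, c1 = (a + 1) + fuel := ⟨c1 - fuel - 1, by omega⟩
      rw [show (ent (-1 : Int) c2 ([] : List (Int × Nat))) = ent (-1 : Int) c2 (ent 0 0 []) by rw [ent_zero]]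
      have hph := phase_two fuel (a+1) c2 0 0
      simp only [Nat.add_zero, Nat.zero_add] at hph
      rw [hph, final_split 2 (by omega),
          altLoop_end_s _ _ _ _ (by omega) (by push_cast; omega) (by push_cast; omega)]
    · -- all size-2 piles are gone before pop K: a size-≤1 pile is popped, [0, 0]
      obtain ⟨f1, rfl⟩ : ∃ f1, fuel = c1 + f1 := ⟨fuel - c1, by omega⟩
      rw [show (ent (-1 : Int) c2 ([] : List (Int × Nat))) = ent (-1 : Int) c2 (ent 0 0 []) by rw [ent_zero]]
      have hph := phase_two c1 0 c2 0 f1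
      simp only [Nat.zero_add] at hph
      rw [hph, ent_zero]
      obtain ⟨m, hm⟩ : ∃ m, c2 + c1 = m + 1 := ⟨c2 + c1 - 1, by omega⟩
      rw [hm, head_done _ _ (by omega)]
      by_cases hk2 : (c1 : Int) + f1 + 1 ≤ c1 + c2
      · rw [altLoop_end_one _ _ _ _ (by omega) (by omega) (by push_cast; omega) (by push_cast; omega)]
      · rw [altLoop_go _ _ _ _ (by omega) (by push_cast; omega)]
        rw [if_neg (by rw [PySem.Int.mod_eq_emod_of_pos (by omega)]; omega)]
        rw [show PySem.Int.floordiv 2 2 = 1 by rw [PySem.Int.floordiv_eq_ediv_of_pos (by omega)]; decide,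
            altLoop_low _ _ _ _ (by omega)]
  -- now s ≥ 3
  have hs3 : 3 ≤ s := by omega
  by_cases hpar : s % 2 = 1
  · -- odd s = 2q+1: children of s are (q, q), children of s-1 are (q, q-1)
    obtain ⟨q, rfl, hq⟩ : ∃ q, s = 2*q+1 ∧ 1 ≤ q := ⟨s / 2, by omega⟩
    rw [show ((2*q+1:Int) - 1) = 2*q by ring]
    by_cases hk1 : fuel < c1
    · -- pop K is a pile of size s
      obtain ⟨a, rfl⟩ : ∃ a, c1 = (a + 1) + fuel := ⟨c1 - fuel - 1, by omega⟩
      rw [show (ent (-(2*q) : Int) c2 ([] : List (Int × Nat))) = ent (-(2*q) : Int) c2 (ent (-q) 0 []) by rw [ent_zero]]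
      have hph := phase1_odd q hq c2 fuel (a+1) 0 0
      simp only [Nat.add_zero, Nat.zero_add] at hph
      rw [hph, final_split (2*q+1) (by omega),
          altLoop_end_s _ _ _ _ (by omega) (by push_cast; omega) (by push_cast; omega)]
    by_cases hk2 : fuel < c1 + c2
    · -- pop K is a pile of size s-1
      obtain ⟨f1, rfl⟩ : ∃ f1, fuel = c1 + f1 := ⟨fuel - c1, by omega⟩
      rw [show (ent (-(2*q) : Int) c2 ([] : List (Int × Nat))) = ent (-(2*q) : Int) c2 (ent (-q) 0 []) by rw [ent_zero]]
      have hph := phase1_odd q hq c2 c1 0 0 f1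
      simp only [Nat.zero_add] at hph
      rw [hph, ent_zero]
      obtain ⟨b, hb⟩ : ∃ b, c2 = (b + 1) + f1 := ⟨c2 - f1 - 1, by omega⟩
      rw [hb, show (ent (-q : Int) (2*c1) (([] : List (Int × Nat)))) = ent (-q : Int) (2*c1) (ent (-(q-1)) 0 []) by rw [ent_zero]]
      have hph2 := phase2_odd q hq f1 (b+1) (2*c1) 0 0
      simp only [Nat.add_zero, Nat.zero_add] at hph2
      rw [hph2, final_split (2*q) (by omega),
          altLoop_end_s1 _ _ _ _ (by omega) (by push_cast; omega) (by push_cast; omega)]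
      rw [show ((2*q+1:Int) - 1 - 1) = 2*q - 1 by ring]
    · -- the whole generation is popped: recurse on the next generation (s' = q)
      obtain ⟨f2, rfl⟩ : ∃ f2, fuel = c1 + (c2 + f2) := ⟨fuel - c1 - c2, by omega⟩
      rw [show (ent (-(2*q) : Int) c2 ([] : List (Int × Nat))) = ent (-(2*q) : Int) c2 (ent (-q) 0 []) by rw [ent_zero]]
      have hph := phase1_odd q hq c2 c1 0 0 (c2 + f2)
      simp only [Nat.zero_add] at hph
      rw [hph, ent_zero]
      rw [show (ent (-q : Int) (2*c1) (([] : List (Int × Nat)))) = ent (-q : Int) (2*c1) (ent (-(q-1)) 0 []) by rw [ent_zero]]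
      have hph2 := phase2_odd q hq c2 0 (2*c1) 0 f2
      simp only [Nat.zero_add] at hph2
      rw [hph2, ent_zero]
      have hrec := ih f2 (by omega) q (2*c1 + c2) c2 (by omega) (by omega)
      rw [altLoop_go (2*q+1) c1 c2 _ (by omega) (by push_cast; omega)]
      rw [if_pos (by rw [show ((2*q+1:Int) - 1) = 2*q by ring, PySem.Int.mod_eq_emod_of_pos (by omega)]; omega)]
      rw [show PySem.Int.floordiv ((2*q+1:Int) - 1) 2 = q by
            rw [show ((2*q+1:Int) - 1) = 2*q by ring, PySem.Int.floordiv_eq_ediv_of_pos (by omega)]; omega]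
      rw [show ((2:Int) * (c1:Int) + (c2:Int)) = ((2*c1+c2 : Nat) : Int) by push_cast; ring]
      rw [show (((c1 + (c2 + f2) : Nat) : Int) + 1 - ((c1:Int) + (c2:Int))) = (f2:Int) + 1 by push_cast; ring]
      exact hrec
  · -- even s = 2q+2: children of s are (q+1, q), children of s-1 are (q, q)
    obtain ⟨q, rfl, hq⟩ : ∃ q, s = 2*q+2 ∧ 1 ≤ q := ⟨s / 2 - 1, by omega⟩
    rw [show ((2*q+2:Int) - 1) = 2*q+1 by ring]
    by_cases hk1 : fuel < c1
    · obtain ⟨a, rfl⟩ : ∃ a, c1 = (a + 1) + fuel := ⟨c1 - fuel - 1, by omega⟩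
      rw [show (ent (-(2*q+1) : Int) c2 ([] : List (Int × Nat)))
            = ent (-(2*q+1) : Int) c2 (ent (-(q+1)) 0 (ent (-q) 0 [])) by rw [ent_zero, ent_zero]]
      have hph := phase1_even q hq c2 fuel (a+1) 0 0 0
      simp only [Nat.add_zero, Nat.zero_add] at hph
      rw [hph, final_split (2*q+2) (by omega),
          altLoop_end_s _ _ _ _ (by omega) (by push_cast; omega) (by push_cast; omega)]
    by_cases hk2 : fuel < c1 + c2
    · obtain ⟨f1, rfl⟩ : ∃ f1, fuel = c1 + f1 := ⟨fuel - c1, by omega⟩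
      rw [show (ent (-(2*q+1) : Int) c2 ([] : List (Int × Nat)))
            = ent (-(2*q+1) : Int) c2 (ent (-(q+1)) 0 (ent (-q) 0 [])) by rw [ent_zero, ent_zero]]
      have hph := phase1_even q hq c2 c1 0 0 0 f1
      simp only [Nat.zero_add] at hph
      rw [hph, ent_zero]
      obtain ⟨b, hb⟩ : ∃ b, c2 = (b + 1) + f1 := ⟨c2 - f1 - 1, by omega⟩
      rw [hb]
      have hph2 := phase2_even q hq f1 (b+1) c1 c1 0
      simp only [Nat.add_zero] at hph2
      rw [hph2, final_split (2*q+1) (by omega),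
          altLoop_end_s1 _ _ _ _ (by omega) (by push_cast; omega) (by push_cast; omega)]
      rw [show ((2*q+2:Int) - 1 - 1) = 2*q+1-1 by ring]
    · obtain ⟨f2, rfl⟩ : ∃ f2, fuel = c1 + (c2 + f2) := ⟨fuel - c1 - c2, by omega⟩
      rw [show (ent (-(2*q+1) : Int) c2 ([] : List (Int × Nat)))
            = ent (-(2*q+1) : Int) c2 (ent (-(q+1)) 0 (ent (-q) 0 [])) by rw [ent_zero, ent_zero]]
      have hph := phase1_even q hq c2 c1 0 0 0 (c2 + f2)
      simp only [Nat.zero_add] at hph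
      rw [hph, ent_zero]
      have hph2 := phase2_even q hq c2 0 c1 c1 f2
      simp only [Nat.zero_add] at hph2
      rw [hph2, ent_zero]
      have hrec := ih f2 (by omega) (q+1) c1 (c1 + 2*c2) (by omega) (by omega)
      rw [show (-((q:Int)+1-1)) = -q by ring] at hrec
      rw [altLoop_go (2*q+2) c1 c2 _ (by omega) (by push_cast; omega)]
      rw [if_neg (by rw [show ((2*q+2:Int) - 1) = 2*q+1 by ring, PySem.Int.mod_eq_emod_of_pos (by omega)]; omega)]
      rw [show PySem.Int.floordiv (2*q+2:Int) 2 = q+1 by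
            rw [PySem.Int.floordiv_eq_ediv_of_pos (by omega)]; omega]
      rw [show ((c1:Int) + 2 * (c2:Int)) = ((c1+2*c2 : Nat) : Int) by push_cast; ring]
      rw [show (((c1 + (c2 + f2) : Nat) : Int) + 1 - ((c1:Int) + (c2:Int))) = (f2:Int) + 1 by push_cast; ring]
      exact hrec

-- ===== VERDICT (by name: the statement is the Claim_ definition above) =====
theorem check_spec : Claim_equal_check := by
  intro N K _
  show check N K = check_alt N K
  unfold check check_alt
  rw [show pvHeapPush (-N) ([] : List (Int × Nat)) = ent (-N) 1 (ent (-(N-1)) 0 []) by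
        simp [pvHeapPush, ent]]
  by_cases hN : 1 ≤ N
  · have h := main_loop (K-1).toNat N 1 0 hN (by omega)
    simp only [Nat.cast_one, Nat.cast_zero] at h
    rw [h, show (((K-1).toNat : Int) + 1) = (if K > 1 then K else 1) by split_ifs <;> omega]
  · rw [ent_zero, head_done _ _ (by omega), altLoop_low _ _ _ _ (by omega)]
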